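-- pv_equiv track=rewrite | github.com/benquick123/code-profiling | code/batch-2/vse-naloge-brez-testov/DN7-Z-060.py | brez_sosedov
-- ===== SOURCE A (Python) =====
-- def imamoMino(x,y,mine):
--     """
--         Vrni 1, če je na polju s koordinatami `(x, y)` mina.
--         Vrne 0, če na polju ni mine.
--
--         Args:
--             x (int): koordinata x
--             y (int): koordinata y
--             mine (set of tuple of int): koordinate min
--
--         Returns:
--             1: imamo mino
--             0: nimamo mine
--         """
--     item = (x,y)
--     if item in mine: #
--         return 1
--     else: return 0
--
-- def sosedov(x, y, mine):
--     """
--     Vrni število sosedov polja s koordinatami `(x, y)` na katerih je mina.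
--     Polje samo ne šteje.
--
--     Args:
--         x (int): koordinata x
--         y (int): koordinata y
--         mine (set of tuple of int): koordinate min
--
--     Returns:
--         int: število sosedov
--     """
--     stevec_min = 0
--     for i in range(x - 1, x + 2):
--         for j in range(y - 1, y + 2):
--             if i > -1 and j > -1 and not (i == x and j == y):
--                 stevec_min += imamoMino(i, j, mine)
--     return stevec_min
--
-- def brez_sosedov(mine, s, v):
--     """
--     Vrni množico koordinat polj brez min na sosednjih poljih. Polje samo lahko
--     vsebuje mino.
--
--     Args:
--         mine (set of tuple of int): koordinate min
--         s (int): širina polja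
--         v (int): višina polja
--
--     Returns:
--         set of tuple: polja brez min na sosednjih poljih
--     """
--     iskano_polje = set()
--     for i in range(s):
--         for j in range(v):
--             if sosedov(i, j, mine) == 0:  # nimamo mobene mine na sosednjih poljih
--                 item = (i, j)
--                 iskano_polje.add(item)  # dodamo polje v množico iskanih polj
--     return iskano_polje
-- ===== SOURCE B (Python) =====
-- def brez_sosedov(mine, s, v):
--     # Mine-centred sweep: mark the 8 neighbours of each (non-negative) mine as
--     # "bad", then keep the grid cells that were never marked.
--     offs = [(-1, -1), (-1, 0), (-1, 1), (0, -1), (0, 1), (1, -1), (1, 0), (1, 1)]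
--     bad = set()
--     for (p, q) in mine:
--         if p >= 0 and q >= 0:
--             for (dp, dq) in offs:
--                 bad.add((p + dp, q + dq))
--     return {(i, j) for i in range(s) for j in range(v) if (i, j) not in bad}
-- ===== Notes on version B (the rewrite author's own statement) =====
-- stated objective: alternative
-- what changed: Instead of scanning the 3x3 neighborhood of every grid cell and counting mines there (per-cell sosedov), B sweeps once over the mines, marks the 8 neighbours of each non-negative mine in a 'bad' set, and returns the grid cells not marked.
import Mathlib
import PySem

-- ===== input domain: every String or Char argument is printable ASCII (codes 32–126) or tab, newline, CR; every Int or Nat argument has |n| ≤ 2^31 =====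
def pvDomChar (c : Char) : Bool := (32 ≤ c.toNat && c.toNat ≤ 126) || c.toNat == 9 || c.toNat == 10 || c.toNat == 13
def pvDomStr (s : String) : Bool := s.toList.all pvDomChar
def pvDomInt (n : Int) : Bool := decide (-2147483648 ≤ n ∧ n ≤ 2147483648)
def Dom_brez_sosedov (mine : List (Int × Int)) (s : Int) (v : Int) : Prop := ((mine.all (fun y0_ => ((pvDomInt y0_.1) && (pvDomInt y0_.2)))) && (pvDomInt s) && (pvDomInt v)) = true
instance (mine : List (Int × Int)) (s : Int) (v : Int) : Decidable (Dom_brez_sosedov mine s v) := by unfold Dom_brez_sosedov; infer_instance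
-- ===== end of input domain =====

-- B marks the 8 neighbours of each mine once instead of counting mines around every cell.
-- Python's set outputs: both ports build the result set in the same row-major insertion order.

-- ===== PORT A =====
def imamoMino (x : Int) (y : Int) (mine : List (Int × Int)) : Int :=
  if (x, y) ∈ mine then 1 else 0

def sosedov (x : Int) (y : Int) (mine : List (Int × Int)) : Int :=
  (PySem.List.pyRange (x - 1) (x + 2) 1).foldl (fun acc i =>
    (PySem.List.pyRange (y - 1) (y + 2) 1).foldl (fun acc j =>
      if i > -1 ∧ j > -1 ∧ ¬(i = x ∧ j = y) then acc + imamoMino i j mine else acc) acc) 0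

def brez_sosedov (mine : List (Int × Int)) (s : Int) (v : Int) : List (Int × Int) :=
  (PySem.List.pyRange 0 s 1).foldl (fun acc i =>
    (PySem.List.pyRange 0 v 1).foldl (fun acc j =>
      if sosedov i j mine = 0 then PySem.Set.add acc (i, j) else acc) acc)
    (PySem.Set.empty : PySem.Set (Int × Int))

-- ===== PORT B =====
def pvOffs : List (Int × Int) := [(-1, -1), (-1, 0), (-1, 1), (0, -1), (0, 1), (1, -1), (1, 0), (1, 1)]

def pvBad (mine : List (Int × Int)) : PySem.Set (Int × Int) :=
  mine.foldl (fun bad pq =>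
    if 0 ≤ pq.1 ∧ 0 ≤ pq.2 then
      pvOffs.foldl (fun b d => PySem.Set.add b (pq.1 + d.1, pq.2 + d.2)) bad
    else bad) (PySem.Set.empty : PySem.Set (Int × Int))

def brez_sosedov_alt (mine : List (Int × Int)) (s : Int) (v : Int) : List (Int × Int) :=
  let bad := pvBad mine
  (PySem.List.pyRange 0 s 1).foldl (fun acc i =>
    (PySem.List.pyRange 0 v 1).foldl (fun acc j =>
      if (i, j) ∈ bad then acc else PySem.Set.add acc (i, j)) acc)
    (PySem.Set.empty : PySem.Set (Int × Int))

-- ===== PRECONDITION & SPEC =====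
def Spec_brez_sosedov (mine : List (Int × Int)) (s : Int) (v : Int) (out : List (Int × Int)) : Prop := out = brez_sosedov_alt mine s v
instance (mine : List (Int × Int)) (s : Int) (v : Int) (out : List (Int × Int)) : Decidable (Spec_brez_sosedov mine s v out) := by unfold Spec_brez_sosedov; infer_instance

-- ===== CLAIM (what is proved, stated in full; the proofs are below) =====
def Claim_equal_brez_sosedov : Prop := ∀ (mine : List (Int × Int)) (s : Int) (v : Int), Dom_brez_sosedov mine s v → Spec_brez_sosedov mine s v (brez_sosedov mine s v)

-- ===== LEMMAS AND PROOFS =====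

lemma mem_offs (p q a b : Int) :
    (∃ d ∈ pvOffs, (a, b) = (p + d.1, q + d.2)) ↔
      (p - 1 ≤ a ∧ a ≤ p + 1 ∧ q - 1 ≤ b ∧ b ≤ q + 1 ∧ ¬(a = p ∧ b = q)) := by
  constructor
  · rintro ⟨d, hd, he⟩
    simp [pvOffs] at hd
    rw [Prod.ext_iff] at he
    rcases hd with h|h|h|h|h|h|h|h <;> subst h <;> simp_all <;> omega
  · rintro ⟨h1, h2, h3, h4, h5⟩
    refine ⟨(a - p, b - q), ?_, by simp⟩
    simp [pvOffs, Prod.ext_iff]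
    omega

lemma mem_pvBad_aux (mine : List (Int × Int)) (acc : PySem.Set (Int × Int)) (c : Int × Int) :
    c ∈ mine.foldl (fun bad pq =>
      if 0 ≤ pq.1 ∧ 0 ≤ pq.2 then
        pvOffs.foldl (fun b d => PySem.Set.add b (pq.1 + d.1, pq.2 + d.2)) bad
      else bad) acc ↔
    c ∈ acc ∨ ∃ pq ∈ mine, 0 ≤ pq.1 ∧ 0 ≤ pq.2 ∧
      pq.1 - 1 ≤ c.1 ∧ c.1 ≤ pq.1 + 1 ∧ pq.2 - 1 ≤ c.2 ∧ c.2 ≤ pq.2 + 1 ∧ ¬(c.1 = pq.1 ∧ c.2 = pq.2) := by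
  induction mine generalizing acc with
  | nil => simp
  | cons pq rest ih =>
    simp only [List.foldl_cons]
    by_cases h : 0 ≤ pq.1 ∧ 0 ≤ pq.2
    · rw [if_pos h, ih, PySem.Set.mem_foldl_add]
      have := mem_offs pq.1 pq.2 c.1 c.2
      simp only [List.mem_cons]
      constructor
      · rintro (⟨hc | ⟨d, hd, he⟩⟩ | ⟨r, hr, hrest⟩)
        · exact Or.inl hc
        · refine Or.inr ⟨pq, Or.inl rfl, h.1, h.2, ?_⟩
          have := this.mp ⟨d, hd, by rw [he]⟩
          tauto
        · exact Or.inr ⟨r, Or.inr hr, hrest⟩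
      · rintro (hc | ⟨r, (rfl | hr), hrest⟩)
        · exact Or.inl (Or.inl hc)
        · refine Or.inl (Or.inr ?_)
          obtain ⟨d, hd, he⟩ := this.mpr ⟨hrest.2.2.1, hrest.2.2.2.1, hrest.2.2.2.2.1, hrest.2.2.2.2.2.1, hrest.2.2.2.2.2.2⟩
          exact ⟨d, hd, by rw [← he]⟩
        · exact Or.inr ⟨r, hr, hrest⟩
    · rw [if_neg h, ih]
      constructor
      · rintro (hc | ⟨r, hr, hrest⟩)
        · exact Or.inl hc
        · exact Or.inr ⟨r, List.mem_cons_of_mem _ hr, hrest⟩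
      · rintro (hc | ⟨r, hr, hrest⟩)
        · exact Or.inl hc
        · rcases List.mem_cons.mp hr with rfl | hr
          · exact absurd ⟨hrest.1, hrest.2.1⟩ h
          · exact Or.inr ⟨r, hr, hrest⟩

lemma sum_zero_iff (l : List Int) (h : ∀ x ∈ l, 0 ≤ x) : l.sum = 0 ↔ ∀ x ∈ l, x = 0 := by
  induction l with
  | nil => simp
  | cons a t ih =>
    simp only [List.sum_cons, List.mem_cons]
    have ha := h a (by simp)
    have ht : 0 ≤ t.sum := List.sum_nonneg (fun x hx => h x (by simp [hx]))
    constructor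
    · intro h0 x hx
      rcases hx with rfl | hx
      · omega
      · exact (ih (fun x hx => h x (by simp [hx]))).mp (by omega) x hx
    · intro hall
      rw [hall a (Or.inl rfl), (ih (fun x hx => h x (by simp [hx]))).mpr (fun x hx => hall x (Or.inr hx))]
      simp

lemma sosedov_sum (x y : Int) (mine : List (Int × Int)) :
    sosedov x y mine =
      ((PySem.List.pyRange (x - 1) (x + 2) 1).map (fun i =>
        ((PySem.List.pyRange (y - 1) (y + 2) 1).map (fun j =>
          if i > -1 ∧ j > -1 ∧ ¬(i = x ∧ j = y) then imamoMino i j mine else 0)).sum)).sum := by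
  unfold sosedov
  have hinner : ∀ i (a : Int),
      (PySem.List.pyRange (y - 1) (y + 2) 1).foldl (fun acc j =>
        if i > -1 ∧ j > -1 ∧ ¬(i = x ∧ j = y) then acc + imamoMino i j mine else acc) a =
      a + ((PySem.List.pyRange (y - 1) (y + 2) 1).map (fun j =>
        if i > -1 ∧ j > -1 ∧ ¬(i = x ∧ j = y) then imamoMino i j mine else 0)).sum := by
    intro i a
    rw [show (fun acc j =>
        if i > -1 ∧ j > -1 ∧ ¬(i = x ∧ j = y) then acc + imamoMino i j mine else acc) =
      (fun (acc : Int) j => acc + (if i > -1 ∧ j > -1 ∧ ¬(i = x ∧ j = y) then imamoMino i j mine else 0)) from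
        by funext acc j; split_ifs <;> simp]
    exact PySem.List.foldl_add _ _ _
  calc (PySem.List.pyRange (x - 1) (x + 2) 1).foldl (fun acc i =>
        (PySem.List.pyRange (y - 1) (y + 2) 1).foldl (fun acc j =>
          if i > -1 ∧ j > -1 ∧ ¬(i = x ∧ j = y) then acc + imamoMino i j mine else acc) acc) 0
      = (PySem.List.pyRange (x - 1) (x + 2) 1).foldl (fun acc i =>
          acc + ((PySem.List.pyRange (y - 1) (y + 2) 1).map (fun j =>
            if i > -1 ∧ j > -1 ∧ ¬(i = x ∧ j = y) then imamoMino i j mine else 0)).sum) 0 := by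
        congr 1; funext acc i; exact hinner i acc
    _ = _ := by rw [PySem.List.foldl_add]; simp

lemma sosedov_eq_zero (x y : Int) (mine : List (Int × Int)) :
    sosedov x y mine = 0 ↔ ∀ pq ∈ mine, ¬(0 ≤ pq.1 ∧ 0 ≤ pq.2 ∧
      x - 1 ≤ pq.1 ∧ pq.1 ≤ x + 1 ∧ y - 1 ≤ pq.2 ∧ pq.2 ≤ y + 1 ∧ ¬(pq.1 = x ∧ pq.2 = y)) := by
  rw [sosedov_sum]
  rw [sum_zero_iff _ (by
    intro t ht
    simp only [List.mem_map] at ht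
    obtain ⟨i, _, rfl⟩ := ht
    apply List.sum_nonneg
    intro u hu
    simp only [List.mem_map] at hu
    obtain ⟨j, _, rfl⟩ := hu
    split_ifs
    · simp [imamoMino]; split_ifs <;> simp
    · simp)]
  constructor
  · intro h pq hpq hc
    have hx : pq.1 ∈ PySem.List.pyRange (x - 1) (x + 2) 1 := by
      rw [PySem.List.mem_pyRange_one]; omega
    have hy : pq.2 ∈ PySem.List.pyRange (y - 1) (y + 2) 1 := by
      rw [PySem.List.mem_pyRange_one]; omega
    have h0 := h _ (List.mem_map.mpr ⟨pq.1, hx, rfl⟩)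
    rw [sum_zero_iff _ (by
      intro u hu
      simp only [List.mem_map] at hu
      obtain ⟨j, _, rfl⟩ := hu
      split_ifs
      · simp [imamoMino]; split_ifs <;> simp
      · simp)] at h0
    have h1 := h0 _ (List.mem_map.mpr ⟨pq.2, hy, rfl⟩)
    rw [if_pos (by constructor; omega; constructor; omega; tauto)] at h1
    simp [imamoMino] at h1
    exact h1 hpq
  · intro h t ht
    simp only [List.mem_map] at ht
    obtain ⟨i, hi, rfl⟩ := ht
    rw [sum_zero_iff _ (by
      intro u hu
      simp only [List.mem_map] at hu
      obtain ⟨j, _, rfl⟩ := hu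
      split_ifs
      · simp [imamoMino]; split_ifs <;> simp
      · simp)]
    intro u hu
    simp only [List.mem_map] at hu
    obtain ⟨j, hj, rfl⟩ := hu
    rw [PySem.List.mem_pyRange_one] at hi hj
    split_ifs with hc
    · simp only [imamoMino]
      split_ifs with hm
      · exfalso
        exact h (i, j) hm ⟨by omega, by omega, by omega, by omega, by omega, by omega, by tauto⟩
      · rfl
    · rfl

-- membership in B's bad set
lemma mem_pvBad (mine : List (Int × Int)) (c : Int × Int) :
    c ∈ pvBad mine ↔ ∃ pq ∈ mine, 0 ≤ pq.1 ∧ 0 ≤ pq.2 ∧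
      pq.1 - 1 ≤ c.1 ∧ c.1 ≤ pq.1 + 1 ∧ pq.2 - 1 ≤ c.2 ∧ c.2 ≤ pq.2 + 1 ∧ ¬(c.1 = pq.1 ∧ c.2 = pq.2) := by
  rw [pvBad, mem_pvBad_aux]
  simp [PySem.Set.empty]

lemma key_iff (i j : Int) (mine : List (Int × Int)) :
    sosedov i j mine = 0 ↔ (i, j) ∉ pvBad mine := by
  rw [sosedov_eq_zero, mem_pvBad]
  constructor
  · rintro h ⟨pq, hpq, h0, h1, h2, h3, h4, h5, h6⟩
    exact h pq hpq ⟨h0, h1, by omega, by omega, by omega, by omega, by omega⟩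
  · intro h pq hpq hc
    exact h ⟨pq, hpq, hc.1, hc.2.1, by omega, by omega, by omega, by omega, by omega⟩

-- ===== VERDICT (by name: the statement is the Claim_ definition above) =====
theorem brez_sosedov_spec : Claim_equal_brez_sosedov := by
  intro mine s v _
  unfold Spec_brez_sosedov brez_sosedov brez_sosedov_alt
  congr 1
  funext acc i
  congr 1
  funext acc j
  by_cases h : (i, j) ∈ pvBad mine
  · rw [if_pos h, if_neg (by simpa [key_iff] using h)]
  · rw [if_neg h, if_pos ((key_iff i j mine).mpr h)]
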